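-- pv_equiv track=rewrite | github.com/x2ansible/x2ansible | agents/classifier_agent.py | _identify_section_type
-- ===== SOURCE A (Python) =====
-- from typing import Any, Dict, List, Optional
--
-- def _identify_section_type(line: str) -> Optional[str]:
--     clean_line = line.lstrip('* ').strip().lower()
--     section_patterns = {
--         'tool/language:': 'classification',
--         'summary:': 'summary',
--         'detailed analysis:': 'detailed_analysis',
--         'resources/components:': 'resources',
--         'key operations:': 'key_operations',
--         'dependencies:': 'dependencies',
--         'configuration details:': 'configuration_details',
--         'complexity level:': 'complexity_level',
--         'convertible:': 'convertible',
--         'conversion notes:': 'conversion_notes'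
--     }
--     for pattern, section in section_patterns.items():
--         if clean_line.startswith(pattern):
--             return section
--     return None
-- ===== SOURCE B (Python) =====
-- from typing import Optional
--
-- def _identify_section_type(line: str) -> Optional[str]:
--     clean_line = line.lstrip('* ').strip().lower()
--     section_patterns = {
--         'tool/language:': 'classification',
--         'summary:': 'summary',
--         'detailed analysis:': 'detailed_analysis',
--         'resources/components:': 'resources',
--         'key operations:': 'key_operations',
--         'dependencies:': 'dependencies',
--         'configuration details:': 'configuration_details',
--         'complexity level:': 'complexity_level',
--         'convertible:': 'convertible',
--         'conversion notes:': 'conversion_notes'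
--     }
--     idx = clean_line.find(':')
--     if idx == -1:
--         return None
--     return section_patterns.get(clean_line[:idx + 1])
-- ===== Notes on version B (the rewrite author's own statement) =====
-- stated objective: idiomatic
-- what changed: Replaces A's linear startswith scan over all ten patterns by extracting the prefix of the normalized line through its first colon and doing a single dict lookup (None when the line has no colon or the key is unknown).
import Mathlib
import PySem

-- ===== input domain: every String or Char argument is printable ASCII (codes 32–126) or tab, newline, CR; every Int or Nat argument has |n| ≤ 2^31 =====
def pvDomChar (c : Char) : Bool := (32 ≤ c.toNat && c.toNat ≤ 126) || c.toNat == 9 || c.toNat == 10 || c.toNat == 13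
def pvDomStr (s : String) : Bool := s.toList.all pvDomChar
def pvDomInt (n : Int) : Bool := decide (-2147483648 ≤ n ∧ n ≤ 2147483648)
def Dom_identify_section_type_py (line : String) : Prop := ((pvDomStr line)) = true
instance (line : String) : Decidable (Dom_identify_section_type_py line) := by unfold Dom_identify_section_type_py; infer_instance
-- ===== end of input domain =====

-- B replaces A's linear startswith scan over the pattern dict by extracting the
-- prefix through the first ':' and doing a single dict lookup (objective: simpler/idiomatic).

-- shared: the pattern dict, literally as both Pythons write it (keys as code-point lists)
def pvPatterns : List (List Char × String) :=
  [("tool/language:".toList, "classification"),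
   ("summary:".toList, "summary"),
   ("detailed analysis:".toList, "detailed_analysis"),
   ("resources/components:".toList, "resources"),
   ("key operations:".toList, "key_operations"),
   ("dependencies:".toList, "dependencies"),
   ("configuration details:".toList, "configuration_details"),
   ("complexity level:".toList, "complexity_level"),
   ("convertible:".toList, "convertible"),
   ("conversion notes:".toList, "conversion_notes")]

-- shared normalization (identical line of code in A and B):
-- line.lstrip('* ').strip().lower(); lstrip('* ') drops leading chars from {'*',' '} — exact
def pvClean (line : String) : List Char :=
  PySem.Chars.lower (PySem.Chars.strip (line.toList.dropWhile (fun c => c == '*' || c == ' ')))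

-- ===== PORT A =====
-- the for-loop over dict items, first startswith match wins
def pvScanA : List (List Char × String) → List Char → Option String
  | [], _ => none
  | (p, s) :: rest, cs => if PySem.Chars.startswith cs p then some s else pvScanA rest cs

def identify_section_type_py (line : String) : Option String :=
  pvScanA pvPatterns (pvClean line)

-- ===== PORT B =====
-- dict.get: first key equal to the extracted prefix (assoc-list lookup)
def pvGetB : List (List Char × String) → List Char → Option String
  | [], _ => none
  | (p, s) :: rest, k => if k == p then some s else pvGetB rest k

def identify_section_type_py_alt (line : String) : Option String :=
  let clean := pvClean line
  let idx := PySem.Chars.find clean [':']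
  if idx = -1 then none
  else pvGetB pvPatterns (PySem.Chars.slice clean none (some (idx + 1)))

-- ===== PRECONDITION & SPEC =====
def Spec_identify_section_type_py (line : String) (out : Option String) : Prop := out = identify_section_type_py_alt line
instance (line : String) (out : Option String) : Decidable (Spec_identify_section_type_py line out) := by unfold Spec_identify_section_type_py; infer_instance

-- ===== CLAIM (what is proved, stated in full; the proofs are below) =====
def Claim_equal_identify_section_type_py : Prop := ∀ (line : String), Dom_identify_section_type_py line → Spec_identify_section_type_py line (identify_section_type_py line)

-- ===== LEMMAS AND PROOFS =====

-- [a] is a prefix of l iff l's head is a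
theorem pv_singleton_prefix {α : Type} (a : α) (l : List α) : [a] <+: l ↔ l.head? = some a := by
  cases l with
  | nil => simp
  | cons x xs =>
    constructor
    · rintro ⟨t, ht⟩; simp at ht; simp [ht.1]
    · intro h; simp at h; exact ⟨xs, by simp [h]⟩

theorem pv_singleton_prefix_drop {α : Type} (a : α) (l : List α) (i : Nat) :
    [a] <+: l.drop i ↔ l[i]? = some a := by
  rw [pv_singleton_prefix, List.head?_drop]

-- a pattern that ends in ':' and has no earlier ':' matches by startswith
-- exactly when it equals the prefix of cs through cs's first ':'
theorem pv_startswith_iff (q : List Char) (hq : ':' ∉ q) (cs : List Char)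
    (h0 : 0 ≤ PySem.Chars.find cs [':']) :
    PySem.Chars.startswith cs (q ++ [':']) = true ↔
      List.take ((PySem.Chars.find cs [':']).toNat + 1) cs = q ++ [':'] := by
  obtain ⟨hpre, hmin⟩ := PySem.Chars.find_spec h0
  set n := (PySem.Chars.find cs [':']).toNat with hn
  rw [PySem.Chars.startswith_iff cs (q ++ [':'])]
  constructor
  · intro hp
    have hcol : cs[q.length]? = some ':' := by
      obtain ⟨t, ht⟩ := hp
      rw [← ht, List.getElem?_append_left (by simp), List.getElem?_append_right (by simp)]
      simp
    -- n ≤ q.length: an occurrence exists at q.length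
    have hle : n ≤ q.length := by
      by_contra hlt
      exact hmin q.length (by omega) ((pv_singleton_prefix_drop _ _ _).2 hcol)
    -- n = q.length: positions below q.length hold chars of q, none is ':'
    have hcs_n : cs[n]? = some ':' := (pv_singleton_prefix_drop _ _ _).1 hpre
    have heq : n = q.length := by
      rcases Nat.lt_or_ge n q.length with hlt | hge
      · exfalso
        obtain ⟨t, ht⟩ := hp
        have hv : cs[n]? = some q[n] := by
          rw [← ht, List.getElem?_append_left (by simp; omega), List.getElem?_append_left hlt]
          simp [hlt]
        rw [hv] at hcs_n
        have hqn : q[n] = ':' := by injection hcs_n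
        exact hq (hqn ▸ List.getElem_mem hlt)
      · omega
    -- a prefix equals the take of its own length
    have h := List.prefix_iff_eq_take.1 hp
    have hlen : (q ++ [':']).length = n + 1 := by simp [heq]
    rw [hlen] at h
    exact h.symm
  · intro h
    exact h ▸ List.take_prefix _ _

-- if the clean line has no colon, no pattern (every pattern contains ':') matches
theorem pv_no_colon_no_match (cs : List Char)
    (hf : PySem.Chars.find cs [':'] = -1) (q : List Char) (hq : ':' ∈ q) :
    PySem.Chars.startswith cs q = false := by
  have hni := (PySem.Chars.find_eq_neg_one_iff cs [':']).1 hf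
  by_contra h
  have h' : PySem.Chars.startswith cs q = true := by
    cases hb : PySem.Chars.startswith cs q
    · exact absurd hb h
    · rfl
  have hp := (PySem.Chars.startswith_iff cs q).1 h'
  exact hni (((List.singleton_infix_iff ':' q).2 hq).trans hp.isInfix)

-- the core: A's first-match scan of pvPatterns equals B's single lookup by the
-- prefix through the first colon
theorem pv_scan_eq_lookup (cs : List Char) :
    pvScanA pvPatterns cs =
      (if PySem.Chars.find cs [':'] = -1 then none
       else pvGetB pvPatterns (PySem.Chars.slice cs none (some (PySem.Chars.find cs [':'] + 1)))) := by
  by_cases hf : PySem.Chars.find cs [':'] = -1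
  · rw [if_pos hf]
    simp only [pvScanA, pvPatterns]
    rw [pv_no_colon_no_match cs hf _ (by decide), pv_no_colon_no_match cs hf _ (by decide),
        pv_no_colon_no_match cs hf _ (by decide), pv_no_colon_no_match cs hf _ (by decide),
        pv_no_colon_no_match cs hf _ (by decide), pv_no_colon_no_match cs hf _ (by decide),
        pv_no_colon_no_match cs hf _ (by decide), pv_no_colon_no_match cs hf _ (by decide),
        pv_no_colon_no_match cs hf _ (by decide), pv_no_colon_no_match cs hf _ (by decide)]
    simp
  · rw [if_neg hf]
    have h0 : 0 ≤ PySem.Chars.find cs [':'] := by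
      have := PySem.Chars.neg_one_le_find cs [':']
      omega
    have hslice : PySem.Chars.slice cs none (some (PySem.Chars.find cs [':'] + 1)) =
        List.take ((PySem.Chars.find cs [':']).toNat + 1) cs := by
      rw [PySem.Chars.slice_eq_listSlice, PySem.List.slice_to cs (by omega)]
      congr 1
      omega
    rw [hslice]
    -- per pattern: startswith ↔ equality with the extracted key
    have key : ∀ (p : List Char), p.dropLast ++ [':'] = p → ':' ∉ p.dropLast →
        PySem.Chars.startswith cs p =
          (List.take ((PySem.Chars.find cs [':']).toNat + 1) cs == p) := by
      intro p hsplit hq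
      rw [← hsplit, Bool.eq_iff_iff, pv_startswith_iff p.dropLast hq cs h0, beq_iff_eq]
    simp only [pvScanA, pvGetB, pvPatterns]
    rw [key _ (by decide) (by decide), key _ (by decide) (by decide),
        key _ (by decide) (by decide), key _ (by decide) (by decide),
        key _ (by decide) (by decide), key _ (by decide) (by decide),
        key _ (by decide) (by decide), key _ (by decide) (by decide),
        key _ (by decide) (by decide), key _ (by decide) (by decide)]

-- ===== VERDICT (by name: the statement is the Claim_ definition above) =====
theorem identify_section_type_py_spec : Claim_equal_identify_section_type_py := by
  intro line _
  unfold Spec_identify_section_type_py identify_section_type_py identify_section_type_py_alt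
  exact pv_scan_eq_lookup (pvClean line)
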